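-- pv_equiv track=rewrite | github.com/remcofl/HilbertSFC | bench/hilbert_bench_torch/plot_results.py | _ordered_providers
-- ===== SOURCE A (Python) =====
-- def _series_key(row: dict[str, str]) -> str:
--     provider = row.get("provider", "")
--     tuning = row.get("triton_tuning", "").strip()
--     if provider == "hilbertsfc_triton" and tuning:
--         return f"{provider}:{tuning}"
--     return provider
--
-- def _provider_from_series(series_key: str) -> str:
--     return series_key.split(":", 1)[0]
--
-- def _ordered_providers(subset: list[dict[str, str]]) -> list[str]:
--     series_keys: list[str] = []
--     for r in subset:
--         key = _series_key(r)
--         if key not in series_keys: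
--             series_keys.append(key)
--
--     preferred = [
--         "skilling_eager",
--         "skilling_triton_2d",
--         "skilling_triton_3d",
--         "hilbertsfc_torch_eager",
--         "hilbertsfc_torch_compile",
--         "hilbertsfc_triton",
--     ]
--
--     tuning_order = ["heuristic", "autotune_bucketed", "autotune_exact"]
--
--     ordered: list[str] = []
--     for provider in preferred:
--         matching = [k for k in series_keys if _provider_from_series(k) == provider]
--         for tuning in tuning_order:
--             tuned = f"{provider}:{tuning}"
--             if tuned in matching:
--                 ordered.append(tuned)
--         if provider in matching:
--             ordered.append(provider)
--         for key in matching: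
--             if key not in ordered:
--                 ordered.append(key)
--
--     extras = [k for k in series_keys if k not in ordered]
--     return ordered + extras
-- ===== SOURCE B (Python) =====
-- def _series_key(row: dict[str, str]) -> str:
--     provider = row.get("provider", "")
--     tuning = row.get("triton_tuning", "").strip()
--     if provider == "hilbertsfc_triton" and tuning:
--         return f"{provider}:{tuning}"
--     return provider
--
-- def _provider_from_series(series_key: str) -> str:
--     return series_key.split(":", 1)[0]
--
-- def _ordered_providers(subset: list[dict[str, str]]) -> list[str]:
--     preferred = [
--         "skilling_eager",
--         "skilling_triton_2d",
--         "skilling_triton_3d",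
--         "hilbertsfc_torch_eager",
--         "hilbertsfc_torch_compile",
--         "hilbertsfc_triton",
--     ]
--     keys = list(dict.fromkeys(_series_key(r) for r in subset))
--
--     def rank(key: str) -> int:
--         provider = _provider_from_series(key)
--         if provider not in preferred:
--             return 30
--         p = preferred.index(provider)
--         if key == provider + ":heuristic":
--             return 5 * p
--         if key == provider + ":autotune_bucketed":
--             return 5 * p + 1
--         if key == provider + ":autotune_exact":
--             return 5 * p + 2
--         if key == provider:
--             return 5 * p + 3
--         return 5 * p + 4
--
--     return [k for r in range(31) for k in keys if rank(k) == r]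
-- ===== Notes on version B (the rewrite author's own statement) =====
-- stated objective: simpler
-- what changed: Replaces A's per-provider scans with repeated membership tests and an append-if-absent loop by a single numeric rank function (provider rank * 5 + tuning/bare/other sub-rank) and one grouping comprehension that emits the deduplicated keys bucket by bucket.
import Mathlib
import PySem

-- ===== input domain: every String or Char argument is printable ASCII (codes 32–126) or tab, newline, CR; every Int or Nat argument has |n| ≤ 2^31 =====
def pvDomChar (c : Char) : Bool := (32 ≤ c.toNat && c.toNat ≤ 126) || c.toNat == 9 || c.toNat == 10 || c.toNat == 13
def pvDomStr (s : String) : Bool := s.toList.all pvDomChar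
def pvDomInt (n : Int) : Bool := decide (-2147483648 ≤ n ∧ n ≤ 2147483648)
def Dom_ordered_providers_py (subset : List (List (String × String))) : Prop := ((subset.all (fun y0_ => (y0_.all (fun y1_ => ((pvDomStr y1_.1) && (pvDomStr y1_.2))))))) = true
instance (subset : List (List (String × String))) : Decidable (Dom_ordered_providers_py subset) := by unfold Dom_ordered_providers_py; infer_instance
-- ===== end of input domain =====

-- B replaces A's per-provider scans and append-if-absent loops by one numeric rank
-- function and a single grouping comprehension over the deduplicated keys (objective: simpler).

-- ===== PORT A =====
-- shared helper: _series_key(row)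
def pvSeriesKey (row : List (String × String)) : String :=
  let provider := (PySem.Dict.mk row).getD "provider" ""
  let tuning := PySem.Str.strip ((PySem.Dict.mk row).getD "triton_tuning" "")
  if provider == "hilbertsfc_triton" && !(tuning == "") then provider ++ ":" ++ tuning
  else provider

-- shared helper: _provider_from_series(series_key) = series_key.split(":", 1)[0]
def pvProviderFromSeries (k : String) : String :=
  match PySem.Str.splitMax? k ":" 1 with
  | some parts => parts.headD ""   -- split(":", 1) always yields a nonempty list; [0] is its head
  | none => ""                     -- unreachable: the separator ":" is nonempty

-- the literal `preferred` and `tuning_order` lists of A (B's Python re-lists `preferred` too)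
def pvPreferred : List String :=
  ["skilling_eager", "skilling_triton_2d", "skilling_triton_3d",
   "hilbertsfc_torch_eager", "hilbertsfc_torch_compile", "hilbertsfc_triton"]

def pvTuningOrder : List String := ["heuristic", "autotune_bucketed", "autotune_exact"]

-- the body of A's `for provider in preferred` loop
def pvProviderStep (series_keys : List String) (ordered : List String) (provider : String) : List String :=
  let matching := series_keys.filter (fun k => pvProviderFromSeries k == provider)
  let ordered := pvTuningOrder.foldl (fun ordered tuning =>
      let tuned := provider ++ ":" ++ tuning
      if tuned ∈ matching then ordered ++ [tuned] else ordered) ordered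
  let ordered := if provider ∈ matching then ordered ++ [provider] else ordered
  matching.foldl (fun ordered key => if key ∈ ordered then ordered else ordered ++ [key]) ordered

def ordered_providers_py (subset : List (List (String × String))) : List String :=
  let series_keys := subset.foldl (fun acc r =>
      let key := pvSeriesKey r
      if key ∈ acc then acc else acc ++ [key]) []
  let ordered := pvPreferred.foldl (pvProviderStep series_keys) []
  let extras := series_keys.filter (fun k => !(decide (k ∈ ordered)))
  ordered ++ extras

-- ===== PORT B =====
-- B's rank(key): provider rank * 5 + sub-rank (tuned 0/1/2, bare 3, other 4), 30 for unknown providers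
def pvRank (key : String) : Int :=
  match PySem.List.index? pvPreferred (pvProviderFromSeries key) with
  | none => 30                     -- `if provider not in preferred: return 30`
  | some p =>
    if key == pvProviderFromSeries key ++ ":heuristic" then 5 * (p : Int)
    else if key == pvProviderFromSeries key ++ ":autotune_bucketed" then 5 * (p : Int) + 1
    else if key == pvProviderFromSeries key ++ ":autotune_exact" then 5 * (p : Int) + 2
    else if key == pvProviderFromSeries key then 5 * (p : Int) + 3
    else 5 * (p : Int) + 4

def ordered_providers_py_alt (subset : List (List (String × String))) : List String :=
  let keys := PySem.List.dedup (subset.map pvSeriesKey)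
  (PySem.List.pyRange 0 31 1).flatMap (fun r => keys.filter (fun k => pvRank k == r))

-- ===== PRECONDITION & SPEC =====
def Spec_ordered_providers_py (subset : List (List (String × String))) (out : List String) : Prop := out = ordered_providers_py_alt subset
instance (subset : List (List (String × String))) (out : List String) : Decidable (Spec_ordered_providers_py subset out) := by unfold Spec_ordered_providers_py; infer_instance

-- ===== CLAIM (what is proved, stated in full; the proofs are below) =====
def Claim_equal_ordered_providers_py : Prop := ∀ (subset : List (List (String × String))), Dom_ordered_providers_py subset → Spec_ordered_providers_py subset (ordered_providers_py subset)

-- ===== LEMMAS AND PROOFS =====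

lemma keysA (subset : List (List (String × String))) :
    subset.foldl (fun acc r => let key := pvSeriesKey r; if key ∈ acc then acc else acc ++ [key]) [] = PySem.List.dedup (subset.map pvSeriesKey) := by
  rw [PySem.List.dedup_eq_ofList, ← PySem.Set.update_nil_left, PySem.Set.update_map_eq_foldl_add]
  refine (PySem.List.foldl_congr_mem _ _ _ _ ?_).symm
  intro acc x _
  simp [PySem.Set.add_eq_ite]

lemma index?_pref (x : String) : PySem.List.index? pvPreferred x =
    (if x = "skilling_eager" then some 0 else if x = "skilling_triton_2d" then some 1
     else if x = "skilling_triton_3d" then some 2 else if x = "hilbertsfc_torch_eager" then some 3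
     else if x = "hilbertsfc_torch_compile" then some 4 else if x = "hilbertsfc_triton" then some 5
     else none) := by
  unfold pvPreferred
  simp only [PySem.List.index?_eq_idxOf?, List.idxOf?_cons, List.idxOf?_nil]
  split_ifs <;> simp_all

def rankSpec (pr k : String) : Int :=
  if pr = "skilling_eager" then
    (if k == "skilling_eager:heuristic" then 0 else if k == "skilling_eager:autotune_bucketed" then 1
     else if k == "skilling_eager:autotune_exact" then 2 else if k == "skilling_eager" then 3 else 4)
  else if pr = "skilling_triton_2d" then
    (if k == "skilling_triton_2d:heuristic" then 5 else if k == "skilling_triton_2d:autotune_bucketed" then 6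
     else if k == "skilling_triton_2d:autotune_exact" then 7 else if k == "skilling_triton_2d" then 8 else 9)
  else if pr = "skilling_triton_3d" then
    (if k == "skilling_triton_3d:heuristic" then 10 else if k == "skilling_triton_3d:autotune_bucketed" then 11
     else if k == "skilling_triton_3d:autotune_exact" then 12 else if k == "skilling_triton_3d" then 13 else 14)
  else if pr = "hilbertsfc_torch_eager" then
    (if k == "hilbertsfc_torch_eager:heuristic" then 15 else if k == "hilbertsfc_torch_eager:autotune_bucketed" then 16
     else if k == "hilbertsfc_torch_eager:autotune_exact" then 17 else if k == "hilbertsfc_torch_eager" then 18 else 19)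
  else if pr = "hilbertsfc_torch_compile" then
    (if k == "hilbertsfc_torch_compile:heuristic" then 20 else if k == "hilbertsfc_torch_compile:autotune_bucketed" then 21
     else if k == "hilbertsfc_torch_compile:autotune_exact" then 22 else if k == "hilbertsfc_torch_compile" then 23 else 24)
  else if pr = "hilbertsfc_triton" then
    (if k == "hilbertsfc_triton:heuristic" then 25 else if k == "hilbertsfc_triton:autotune_bucketed" then 26
     else if k == "hilbertsfc_triton:autotune_exact" then 27 else if k == "hilbertsfc_triton" then 28 else 29)
  else 30

lemma pvRank_eq (k : String) : pvRank k = rankSpec (pvProviderFromSeries k) k := by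
  unfold pvRank rankSpec
  rw [index?_pref]
  by_cases h1 : pvProviderFromSeries k = "skilling_eager"
  · rw [h1]; rfl
  by_cases h2 : pvProviderFromSeries k = "skilling_triton_2d"
  · rw [h2]; rfl
  by_cases h3 : pvProviderFromSeries k = "skilling_triton_3d"
  · rw [h3]; rfl
  by_cases h4 : pvProviderFromSeries k = "hilbertsfc_torch_eager"
  · rw [h4]; rfl
  by_cases h5 : pvProviderFromSeries k = "hilbertsfc_torch_compile"
  · rw [h5]; rfl
  by_cases h6 : pvProviderFromSeries k = "hilbertsfc_triton"
  · rw [h6]; rfl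
  simp only [h1, h2, h3, h4, h5, h6, if_false]

lemma pv_if_append {c : Prop} [Decidable c] (x : List String) (a : String) :
    (if c then x ++ [a] else x) = x ++ (if c then [a] else []) := by
  split_ifs <;> simp

lemma pv_mem_ifsingle {c x : String} {K : List String} (h : x ∈ (if c ∈ K then [c] else [])) : x = c ∧ c ∈ K := by
  split at h <;> simp_all

lemma fold_tuning (M acc : List String) (P : String) :
    pvTuningOrder.foldl (fun ordered tuning =>
      let tuned := P ++ ":" ++ tuning
      if tuned ∈ M then ordered ++ [tuned] else ordered) acc =
    acc ++ (if P ++ ":" ++ "heuristic" ∈ M then [P ++ ":" ++ "heuristic"] else [])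
        ++ (if P ++ ":" ++ "autotune_bucketed" ∈ M then [P ++ ":" ++ "autotune_bucketed"] else [])
        ++ (if P ++ ":" ++ "autotune_exact" ∈ M then [P ++ ":" ++ "autotune_exact"] else []) := by
  simp only [pvTuningOrder, List.foldl]
  split_ifs <;> simp

lemma fold_dedup (l : List String) (acc : List String) (hl : l.Nodup) :
    l.foldl (fun ordered key => if key ∈ ordered then ordered else ordered ++ [key]) acc =
    acc ++ l.filter (fun k => !(decide (k ∈ acc))) := by
  induction l generalizing acc with
  | nil => simp
  | cons a t ih =>
    rcases List.nodup_cons.mp hl with ⟨ha, ht⟩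
    simp only [List.foldl, List.filter_cons]
    by_cases hmem : a ∈ acc
    · rw [if_pos hmem, ih _ ht]
      simp [hmem]
    · rw [if_neg hmem, ih _ ht]
      have : t.filter (fun k => !(decide (k ∈ acc ++ [a]))) = t.filter (fun k => !(decide (k ∈ acc))) := by
        apply List.filter_congr
        intro k hk
        have : k ≠ a := fun h => ha (h ▸ hk)
        simp [List.mem_append, this]
      rw [this]
      simp [hmem]

lemma filter_eq_single (K : List String) (hK : K.Nodup) (p : String → Bool) (c : String)
    (hpc : p c = true) (huniq : ∀ k, p k = true → k = c) :
    K.filter p = if c ∈ K then [c] else [] := by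
  induction K with
  | nil => simp
  | cons a t ih =>
    rcases List.nodup_cons.mp hK with ⟨ha, ht⟩
    simp only [List.filter_cons]
    by_cases hpa : p a = true
    · have hac := huniq a hpa
      subst hac
      rw [hpa]
      have : t.filter p = [] := List.filter_eq_nil_iff.mpr (fun k hk hpk => ha ((huniq k hpk) ▸ hk))
      simp [this]
    · rw [if_neg (by simp [hpa])]
      rw [ih ht]
      have hca : c ≠ a := fun h => hpa (h ▸ hpc)
      simp [List.mem_cons, hca]

lemma step_eq (K acc : List String) (hK : K.Nodup) (P c0 c1 c2 : String)
    (e0 : c0 = P ++ ":" ++ "heuristic") (e1 : c1 = P ++ ":" ++ "autotune_bucketed")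
    (e2 : c2 = P ++ ":" ++ "autotune_exact")
    (p0 : pvProviderFromSeries c0 = P) (p1 : pvProviderFromSeries c1 = P)
    (p2 : pvProviderFromSeries c2 = P) (pP : pvProviderFromSeries P = P)
    (hacc : ∀ x ∈ acc, pvProviderFromSeries x ≠ P) :
    pvProviderStep K acc P =
      acc ++ (if c0 ∈ K then [c0] else []) ++ (if c1 ∈ K then [c1] else [])
          ++ (if c2 ∈ K then [c2] else []) ++ (if P ∈ K then [P] else [])
          ++ K.filter (fun k => pvProviderFromSeries k == P && !(decide (k ∈ ([c0, c1, c2, P] : List String)))) := by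
  simp only [pvProviderStep]
  rw [fold_tuning, ← e0, ← e1, ← e2]
  have hMK : ∀ c, pvProviderFromSeries c = P →
      (c ∈ K.filter (fun k => pvProviderFromSeries k == P)) = (c ∈ K) := by
    intro c hc
    simp [List.mem_filter, hc]
  simp only [pv_if_append, hMK c0 p0, hMK c1 p1, hMK c2 p2, hMK P pP]
  rw [fold_dedup _ _ (hK.filter _)]
  have hfc : (K.filter (fun k => pvProviderFromSeries k == P)).filter
        (fun k => !(decide (k ∈ acc ++ (if c0 ∈ K then [c0] else []) ++ (if c1 ∈ K then [c1] else [])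
          ++ (if c2 ∈ K then [c2] else []) ++ (if P ∈ K then [P] else [])))) =
      (K.filter (fun k => pvProviderFromSeries k == P)).filter
        (fun k => !(decide (k ∈ ([c0, c1, c2, P] : List String)))) := by
    apply List.filter_congr
    intro k hk
    rcases List.mem_filter.mp hk with ⟨hkK, _⟩
    congr 1
    rw [decide_eq_decide]
    constructor
    · intro h
      simp only [List.mem_append] at h
      rcases h with ((((h | h) | h) | h) | h)
      · exact absurd (List.mem_filter.mp hk).2 (by simpa using hacc k h)
      · rcases pv_mem_ifsingle h with ⟨rfl, _⟩; simp
      · rcases pv_mem_ifsingle h with ⟨rfl, _⟩; simp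
      · rcases pv_mem_ifsingle h with ⟨rfl, _⟩; simp
      · rcases pv_mem_ifsingle h with ⟨rfl, _⟩; simp
    · intro h
      simp only [List.mem_cons, List.not_mem_nil, or_false] at h
      simp only [List.mem_append]
      rcases h with rfl | rfl | rfl | rfl
      · exact Or.inl (Or.inl (Or.inl (Or.inr (by simp [hkK]))))
      · exact Or.inl (Or.inl (Or.inr (by simp [hkK])))
      · exact Or.inl (Or.inr (by simp [hkK]))
      · exact Or.inr (by simp [hkK])
  rw [hfc, List.filter_filter]
  simp only [List.append_assoc]
  congr 5
  apply List.filter_congr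
  intro k _
  simp [Bool.and_comm, Bool.and_left_comm]


lemma rs0 (k : String) : rankSpec "skilling_eager" k =
    (if k == "skilling_eager:heuristic" then 0 else if k == "skilling_eager:autotune_bucketed" then 1
     else if k == "skilling_eager:autotune_exact" then 2 else if k == "skilling_eager" then 3 else 4) := rfl

lemma rs1 (k : String) : rankSpec "skilling_triton_2d" k =
    (if k == "skilling_triton_2d:heuristic" then 5 else if k == "skilling_triton_2d:autotune_bucketed" then 6
     else if k == "skilling_triton_2d:autotune_exact" then 7 else if k == "skilling_triton_2d" then 8 else 9) := rfl

lemma rs2 (k : String) : rankSpec "skilling_triton_3d" k =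
    (if k == "skilling_triton_3d:heuristic" then 10 else if k == "skilling_triton_3d:autotune_bucketed" then 11
     else if k == "skilling_triton_3d:autotune_exact" then 12 else if k == "skilling_triton_3d" then 13 else 14) := rfl

lemma rs3 (k : String) : rankSpec "hilbertsfc_torch_eager" k =
    (if k == "hilbertsfc_torch_eager:heuristic" then 15 else if k == "hilbertsfc_torch_eager:autotune_bucketed" then 16
     else if k == "hilbertsfc_torch_eager:autotune_exact" then 17 else if k == "hilbertsfc_torch_eager" then 18 else 19) := rfl

lemma rs4 (k : String) : rankSpec "hilbertsfc_torch_compile" k =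
    (if k == "hilbertsfc_torch_compile:heuristic" then 20 else if k == "hilbertsfc_torch_compile:autotune_bucketed" then 21
     else if k == "hilbertsfc_torch_compile:autotune_exact" then 22 else if k == "hilbertsfc_torch_compile" then 23 else 24) := rfl

lemma rs5 (k : String) : rankSpec "hilbertsfc_triton" k =
    (if k == "hilbertsfc_triton:heuristic" then 25 else if k == "hilbertsfc_triton:autotune_bucketed" then 26
     else if k == "hilbertsfc_triton:autotune_exact" then 27 else if k == "hilbertsfc_triton" then 28 else 29) := rfl

lemma rank_master (k : String) :
    (pvProviderFromSeries k = "skilling_eager" ∧ 0 ≤ pvRank k ∧ pvRank k ≤ 4) ∨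
    (pvProviderFromSeries k = "skilling_triton_2d" ∧ 5 ≤ pvRank k ∧ pvRank k ≤ 9) ∨
    (pvProviderFromSeries k = "skilling_triton_3d" ∧ 10 ≤ pvRank k ∧ pvRank k ≤ 14) ∨
    (pvProviderFromSeries k = "hilbertsfc_torch_eager" ∧ 15 ≤ pvRank k ∧ pvRank k ≤ 19) ∨
    (pvProviderFromSeries k = "hilbertsfc_torch_compile" ∧ 20 ≤ pvRank k ∧ pvRank k ≤ 24) ∨
    (pvProviderFromSeries k = "hilbertsfc_triton" ∧ 25 ≤ pvRank k ∧ pvRank k ≤ 29) ∨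
    (pvRank k = 30) := by
  rw [pvRank_eq]
  by_cases h0 : pvProviderFromSeries k = "skilling_eager"
  · left
    exact ⟨h0, by rw [h0, rs0]; split_ifs <;> omega⟩
  by_cases h1 : pvProviderFromSeries k = "skilling_triton_2d"
  · right; left
    exact ⟨h1, by rw [h1, rs1]; split_ifs <;> omega⟩
  by_cases h2 : pvProviderFromSeries k = "skilling_triton_3d"
  · right; right; left
    exact ⟨h2, by rw [h2, rs2]; split_ifs <;> omega⟩
  by_cases h3 : pvProviderFromSeries k = "hilbertsfc_torch_eager"
  · right; right; right; left
    exact ⟨h3, by rw [h3, rs3]; split_ifs <;> omega⟩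
  by_cases h4 : pvProviderFromSeries k = "hilbertsfc_torch_compile"
  · right; right; right; right; left
    exact ⟨h4, by rw [h4, rs4]; split_ifs <;> omega⟩
  by_cases h5 : pvProviderFromSeries k = "hilbertsfc_triton"
  · right; right; right; right; right; left
    exact ⟨h5, by rw [h5, rs5]; split_ifs <;> omega⟩
  right; right; right; right; right; right
  unfold rankSpec
  rw [if_neg h0, if_neg h1, if_neg h2, if_neg h3, if_neg h4, if_neg h5]

lemma pv_uniq_0 : ∀ k, (pvRank k == (0 : Int)) = true → k = "skilling_eager:heuristic" := by
  intro k h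
  rw [beq_iff_eq] at h
  rcases rank_master k with ⟨hp, hb1, hb2⟩|⟨hp, hb1, hb2⟩|⟨hp, hb1, hb2⟩|⟨hp, hb1, hb2⟩|⟨hp, hb1, hb2⟩|⟨hp, hb1, hb2⟩|h30
  · rw [pvRank_eq, hp, rs0] at h
    split_ifs at h <;> first | (exact eq_of_beq ‹_›) | (exact absurd h (by decide))
  · omega
  · omega
  · omega
  · omega
  · omega
  · omega

lemma pv_uniq_1 : ∀ k, (pvRank k == (1 : Int)) = true → k = "skilling_eager:autotune_bucketed" := by
  intro k h
  rw [beq_iff_eq] at h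
  rcases rank_master k with ⟨hp, hb1, hb2⟩|⟨hp, hb1, hb2⟩|⟨hp, hb1, hb2⟩|⟨hp, hb1, hb2⟩|⟨hp, hb1, hb2⟩|⟨hp, hb1, hb2⟩|h30
  · rw [pvRank_eq, hp, rs0] at h
    split_ifs at h <;> first | (exact eq_of_beq ‹_›) | (exact absurd h (by decide))
  · omega
  · omega
  · omega
  · omega
  · omega
  · omega

lemma pv_uniq_2 : ∀ k, (pvRank k == (2 : Int)) = true → k = "skilling_eager:autotune_exact" := by
  intro k h
  rw [beq_iff_eq] at h
  rcases rank_master k with ⟨hp, hb1, hb2⟩|⟨hp, hb1, hb2⟩|⟨hp, hb1, hb2⟩|⟨hp, hb1, hb2⟩|⟨hp, hb1, hb2⟩|⟨hp, hb1, hb2⟩|h30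
  · rw [pvRank_eq, hp, rs0] at h
    split_ifs at h <;> first | (exact eq_of_beq ‹_›) | (exact absurd h (by decide))
  · omega
  · omega
  · omega
  · omega
  · omega
  · omega

lemma pv_uniq_3 : ∀ k, (pvRank k == (3 : Int)) = true → k = "skilling_eager" := by
  intro k h
  rw [beq_iff_eq] at h
  rcases rank_master k with ⟨hp, hb1, hb2⟩|⟨hp, hb1, hb2⟩|⟨hp, hb1, hb2⟩|⟨hp, hb1, hb2⟩|⟨hp, hb1, hb2⟩|⟨hp, hb1, hb2⟩|h30
  · rw [pvRank_eq, hp, rs0] at h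
    split_ifs at h <;> first | (exact eq_of_beq ‹_›) | (exact absurd h (by decide))
  · omega
  · omega
  · omega
  · omega
  · omega
  · omega

lemma pv_b4_0 : ∀ k, (pvProviderFromSeries k == "skilling_eager" && !(decide (k ∈ (["skilling_eager:heuristic", "skilling_eager:autotune_bucketed", "skilling_eager:autotune_exact", "skilling_eager"] : List String)))) = (pvRank k == (4 : Int)) := by
  intro k
  by_cases hp : pvProviderFromSeries k = "skilling_eager"
  · rw [pvRank_eq, hp, rs0]
    split_ifs with hx0 hx1 hx2 hx3
    · obtain rfl := eq_of_beq hx0; decide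
    · obtain rfl := eq_of_beq hx1; decide
    · obtain rfl := eq_of_beq hx2; decide
    · obtain rfl := eq_of_beq hx3; decide
    · simp only [beq_iff_eq] at hx0 hx1 hx2 hx3
      simp [List.mem_cons, hx0, hx1, hx2, hx3]
  · have hne : pvRank k ≠ (4 : Int) := by
      intro he
      rcases rank_master k with ⟨hp2, hb1, hb2⟩|⟨hp2, hb1, hb2⟩|⟨hp2, hb1, hb2⟩|⟨hp2, hb1, hb2⟩|⟨hp2, hb1, hb2⟩|⟨hp2, hb1, hb2⟩|h30
      · exact absurd hp2 hp
      · omega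
      · omega
      · omega
      · omega
      · omega
      · omega
    rw [Bool.eq_iff_iff]
    simp [hp, hne]

lemma pv_step_0 (K acc : List String) (hK : K.Nodup)
    (hacc : ∀ x ∈ acc, pvProviderFromSeries x ≠ "skilling_eager") :
    pvProviderStep K acc "skilling_eager" =
      acc ++ K.filter (fun k => pvRank k == (0 : Int)) ++ K.filter (fun k => pvRank k == (1 : Int))
          ++ K.filter (fun k => pvRank k == (2 : Int)) ++ K.filter (fun k => pvRank k == (3 : Int))
          ++ K.filter (fun k => pvRank k == (4 : Int)) := by
  rw [step_eq K acc hK "skilling_eager" "skilling_eager:heuristic" "skilling_eager:autotune_bucketed" "skilling_eager:autotune_exact" rfl rfl rfl (by decide) (by decide) (by decide) (by decide) hacc]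
  rw [filter_eq_single K hK _ "skilling_eager:heuristic" (by decide) pv_uniq_0]
  rw [filter_eq_single K hK _ "skilling_eager:autotune_bucketed" (by decide) pv_uniq_1]
  rw [filter_eq_single K hK _ "skilling_eager:autotune_exact" (by decide) pv_uniq_2]
  rw [filter_eq_single K hK _ "skilling_eager" (by decide) pv_uniq_3]
  rw [List.filter_congr (fun k _ => pv_b4_0 k)]

lemma rank_of_prov_1 (x : String) (h : pvProviderFromSeries x = "skilling_triton_2d") :
    (5 : Int) ≤ pvRank x ∧ pvRank x ≤ 9 := by
  rw [pvRank_eq, h, rs1]; split_ifs <;> omega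

lemma pv_uniq_5 : ∀ k, (pvRank k == (5 : Int)) = true → k = "skilling_triton_2d:heuristic" := by
  intro k h
  rw [beq_iff_eq] at h
  rcases rank_master k with ⟨hp, hb1, hb2⟩|⟨hp, hb1, hb2⟩|⟨hp, hb1, hb2⟩|⟨hp, hb1, hb2⟩|⟨hp, hb1, hb2⟩|⟨hp, hb1, hb2⟩|h30
  · omega
  · rw [pvRank_eq, hp, rs1] at h
    split_ifs at h <;> first | (exact eq_of_beq ‹_›) | (exact absurd h (by decide))
  · omega
  · omega
  · omega
  · omega
  · omega

lemma pv_uniq_6 : ∀ k, (pvRank k == (6 : Int)) = true → k = "skilling_triton_2d:autotune_bucketed" := by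
  intro k h
  rw [beq_iff_eq] at h
  rcases rank_master k with ⟨hp, hb1, hb2⟩|⟨hp, hb1, hb2⟩|⟨hp, hb1, hb2⟩|⟨hp, hb1, hb2⟩|⟨hp, hb1, hb2⟩|⟨hp, hb1, hb2⟩|h30
  · omega
  · rw [pvRank_eq, hp, rs1] at h
    split_ifs at h <;> first | (exact eq_of_beq ‹_›) | (exact absurd h (by decide))
  · omega
  · omega
  · omega
  · omega
  · omega

lemma pv_uniq_7 : ∀ k, (pvRank k == (7 : Int)) = true → k = "skilling_triton_2d:autotune_exact" := by
  intro k h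
  rw [beq_iff_eq] at h
  rcases rank_master k with ⟨hp, hb1, hb2⟩|⟨hp, hb1, hb2⟩|⟨hp, hb1, hb2⟩|⟨hp, hb1, hb2⟩|⟨hp, hb1, hb2⟩|⟨hp, hb1, hb2⟩|h30
  · omega
  · rw [pvRank_eq, hp, rs1] at h
    split_ifs at h <;> first | (exact eq_of_beq ‹_›) | (exact absurd h (by decide))
  · omega
  · omega
  · omega
  · omega
  · omega

lemma pv_uniq_8 : ∀ k, (pvRank k == (8 : Int)) = true → k = "skilling_triton_2d" := by
  intro k h
  rw [beq_iff_eq] at h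
  rcases rank_master k with ⟨hp, hb1, hb2⟩|⟨hp, hb1, hb2⟩|⟨hp, hb1, hb2⟩|⟨hp, hb1, hb2⟩|⟨hp, hb1, hb2⟩|⟨hp, hb1, hb2⟩|h30
  · omega
  · rw [pvRank_eq, hp, rs1] at h
    split_ifs at h <;> first | (exact eq_of_beq ‹_›) | (exact absurd h (by decide))
  · omega
  · omega
  · omega
  · omega
  · omega

lemma pv_b4_1 : ∀ k, (pvProviderFromSeries k == "skilling_triton_2d" && !(decide (k ∈ (["skilling_triton_2d:heuristic", "skilling_triton_2d:autotune_bucketed", "skilling_triton_2d:autotune_exact", "skilling_triton_2d"] : List String)))) = (pvRank k == (9 : Int)) := by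
  intro k
  by_cases hp : pvProviderFromSeries k = "skilling_triton_2d"
  · rw [pvRank_eq, hp, rs1]
    split_ifs with hx0 hx1 hx2 hx3
    · obtain rfl := eq_of_beq hx0; decide
    · obtain rfl := eq_of_beq hx1; decide
    · obtain rfl := eq_of_beq hx2; decide
    · obtain rfl := eq_of_beq hx3; decide
    · simp only [beq_iff_eq] at hx0 hx1 hx2 hx3
      simp [List.mem_cons, hx0, hx1, hx2, hx3]
  · have hne : pvRank k ≠ (9 : Int) := by
      intro he
      rcases rank_master k with ⟨hp2, hb1, hb2⟩|⟨hp2, hb1, hb2⟩|⟨hp2, hb1, hb2⟩|⟨hp2, hb1, hb2⟩|⟨hp2, hb1, hb2⟩|⟨hp2, hb1, hb2⟩|h30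
      · omega
      · exact absurd hp2 hp
      · omega
      · omega
      · omega
      · omega
      · omega
    rw [Bool.eq_iff_iff]
    simp [hp, hne]

lemma pv_step_1 (K acc : List String) (hK : K.Nodup)
    (hacc : ∀ x ∈ acc, pvProviderFromSeries x ≠ "skilling_triton_2d") :
    pvProviderStep K acc "skilling_triton_2d" =
      acc ++ K.filter (fun k => pvRank k == (5 : Int)) ++ K.filter (fun k => pvRank k == (6 : Int))
          ++ K.filter (fun k => pvRank k == (7 : Int)) ++ K.filter (fun k => pvRank k == (8 : Int))
          ++ K.filter (fun k => pvRank k == (9 : Int)) := by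
  rw [step_eq K acc hK "skilling_triton_2d" "skilling_triton_2d:heuristic" "skilling_triton_2d:autotune_bucketed" "skilling_triton_2d:autotune_exact" rfl rfl rfl (by decide) (by decide) (by decide) (by decide) hacc]
  rw [filter_eq_single K hK _ "skilling_triton_2d:heuristic" (by decide) pv_uniq_5]
  rw [filter_eq_single K hK _ "skilling_triton_2d:autotune_bucketed" (by decide) pv_uniq_6]
  rw [filter_eq_single K hK _ "skilling_triton_2d:autotune_exact" (by decide) pv_uniq_7]
  rw [filter_eq_single K hK _ "skilling_triton_2d" (by decide) pv_uniq_8]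
  rw [List.filter_congr (fun k _ => pv_b4_1 k)]

lemma rank_of_prov_2 (x : String) (h : pvProviderFromSeries x = "skilling_triton_3d") :
    (10 : Int) ≤ pvRank x ∧ pvRank x ≤ 14 := by
  rw [pvRank_eq, h, rs2]; split_ifs <;> omega

lemma pv_uniq_10 : ∀ k, (pvRank k == (10 : Int)) = true → k = "skilling_triton_3d:heuristic" := by
  intro k h
  rw [beq_iff_eq] at h
  rcases rank_master k with ⟨hp, hb1, hb2⟩|⟨hp, hb1, hb2⟩|⟨hp, hb1, hb2⟩|⟨hp, hb1, hb2⟩|⟨hp, hb1, hb2⟩|⟨hp, hb1, hb2⟩|h30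
  · omega
  · omega
  · rw [pvRank_eq, hp, rs2] at h
    split_ifs at h <;> first | (exact eq_of_beq ‹_›) | (exact absurd h (by decide))
  · omega
  · omega
  · omega
  · omega

lemma pv_uniq_11 : ∀ k, (pvRank k == (11 : Int)) = true → k = "skilling_triton_3d:autotune_bucketed" := by
  intro k h
  rw [beq_iff_eq] at h
  rcases rank_master k with ⟨hp, hb1, hb2⟩|⟨hp, hb1, hb2⟩|⟨hp, hb1, hb2⟩|⟨hp, hb1, hb2⟩|⟨hp, hb1, hb2⟩|⟨hp, hb1, hb2⟩|h30
  · omega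
  · omega
  · rw [pvRank_eq, hp, rs2] at h
    split_ifs at h <;> first | (exact eq_of_beq ‹_›) | (exact absurd h (by decide))
  · omega
  · omega
  · omega
  · omega

lemma pv_uniq_12 : ∀ k, (pvRank k == (12 : Int)) = true → k = "skilling_triton_3d:autotune_exact" := by
  intro k h
  rw [beq_iff_eq] at h
  rcases rank_master k with ⟨hp, hb1, hb2⟩|⟨hp, hb1, hb2⟩|⟨hp, hb1, hb2⟩|⟨hp, hb1, hb2⟩|⟨hp, hb1, hb2⟩|⟨hp, hb1, hb2⟩|h30
  · omega
  · omega
  · rw [pvRank_eq, hp, rs2] at h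
    split_ifs at h <;> first | (exact eq_of_beq ‹_›) | (exact absurd h (by decide))
  · omega
  · omega
  · omega
  · omega

lemma pv_uniq_13 : ∀ k, (pvRank k == (13 : Int)) = true → k = "skilling_triton_3d" := by
  intro k h
  rw [beq_iff_eq] at h
  rcases rank_master k with ⟨hp, hb1, hb2⟩|⟨hp, hb1, hb2⟩|⟨hp, hb1, hb2⟩|⟨hp, hb1, hb2⟩|⟨hp, hb1, hb2⟩|⟨hp, hb1, hb2⟩|h30
  · omega
  · omega
  · rw [pvRank_eq, hp, rs2] at h
    split_ifs at h <;> first | (exact eq_of_beq ‹_›) | (exact absurd h (by decide))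
  · omega
  · omega
  · omega
  · omega

lemma pv_b4_2 : ∀ k, (pvProviderFromSeries k == "skilling_triton_3d" && !(decide (k ∈ (["skilling_triton_3d:heuristic", "skilling_triton_3d:autotune_bucketed", "skilling_triton_3d:autotune_exact", "skilling_triton_3d"] : List String)))) = (pvRank k == (14 : Int)) := by
  intro k
  by_cases hp : pvProviderFromSeries k = "skilling_triton_3d"
  · rw [pvRank_eq, hp, rs2]
    split_ifs with hx0 hx1 hx2 hx3
    · obtain rfl := eq_of_beq hx0; decide
    · obtain rfl := eq_of_beq hx1; decide
    · obtain rfl := eq_of_beq hx2; decide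
    · obtain rfl := eq_of_beq hx3; decide
    · simp only [beq_iff_eq] at hx0 hx1 hx2 hx3
      simp [List.mem_cons, hx0, hx1, hx2, hx3]
  · have hne : pvRank k ≠ (14 : Int) := by
      intro he
      rcases rank_master k with ⟨hp2, hb1, hb2⟩|⟨hp2, hb1, hb2⟩|⟨hp2, hb1, hb2⟩|⟨hp2, hb1, hb2⟩|⟨hp2, hb1, hb2⟩|⟨hp2, hb1, hb2⟩|h30
      · omega
      · omega
      · exact absurd hp2 hp
      · omega
      · omega
      · omega
      · omega
    rw [Bool.eq_iff_iff]
    simp [hp, hne]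

lemma pv_step_2 (K acc : List String) (hK : K.Nodup)
    (hacc : ∀ x ∈ acc, pvProviderFromSeries x ≠ "skilling_triton_3d") :
    pvProviderStep K acc "skilling_triton_3d" =
      acc ++ K.filter (fun k => pvRank k == (10 : Int)) ++ K.filter (fun k => pvRank k == (11 : Int))
          ++ K.filter (fun k => pvRank k == (12 : Int)) ++ K.filter (fun k => pvRank k == (13 : Int))
          ++ K.filter (fun k => pvRank k == (14 : Int)) := by
  rw [step_eq K acc hK "skilling_triton_3d" "skilling_triton_3d:heuristic" "skilling_triton_3d:autotune_bucketed" "skilling_triton_3d:autotune_exact" rfl rfl rfl (by decide) (by decide) (by decide) (by decide) hacc]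
  rw [filter_eq_single K hK _ "skilling_triton_3d:heuristic" (by decide) pv_uniq_10]
  rw [filter_eq_single K hK _ "skilling_triton_3d:autotune_bucketed" (by decide) pv_uniq_11]
  rw [filter_eq_single K hK _ "skilling_triton_3d:autotune_exact" (by decide) pv_uniq_12]
  rw [filter_eq_single K hK _ "skilling_triton_3d" (by decide) pv_uniq_13]
  rw [List.filter_congr (fun k _ => pv_b4_2 k)]

lemma rank_of_prov_3 (x : String) (h : pvProviderFromSeries x = "hilbertsfc_torch_eager") :
    (15 : Int) ≤ pvRank x ∧ pvRank x ≤ 19 := by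
  rw [pvRank_eq, h, rs3]; split_ifs <;> omega

lemma pv_uniq_15 : ∀ k, (pvRank k == (15 : Int)) = true → k = "hilbertsfc_torch_eager:heuristic" := by
  intro k h
  rw [beq_iff_eq] at h
  rcases rank_master k with ⟨hp, hb1, hb2⟩|⟨hp, hb1, hb2⟩|⟨hp, hb1, hb2⟩|⟨hp, hb1, hb2⟩|⟨hp, hb1, hb2⟩|⟨hp, hb1, hb2⟩|h30
  · omega
  · omega
  · omega
  · rw [pvRank_eq, hp, rs3] at h
    split_ifs at h <;> first | (exact eq_of_beq ‹_›) | (exact absurd h (by decide))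
  · omega
  · omega
  · omega

lemma pv_uniq_16 : ∀ k, (pvRank k == (16 : Int)) = true → k = "hilbertsfc_torch_eager:autotune_bucketed" := by
  intro k h
  rw [beq_iff_eq] at h
  rcases rank_master k with ⟨hp, hb1, hb2⟩|⟨hp, hb1, hb2⟩|⟨hp, hb1, hb2⟩|⟨hp, hb1, hb2⟩|⟨hp, hb1, hb2⟩|⟨hp, hb1, hb2⟩|h30
  · omega
  · omega
  · omega
  · rw [pvRank_eq, hp, rs3] at h
    split_ifs at h <;> first | (exact eq_of_beq ‹_›) | (exact absurd h (by decide))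
  · omega
  · omega
  · omega

lemma pv_uniq_17 : ∀ k, (pvRank k == (17 : Int)) = true → k = "hilbertsfc_torch_eager:autotune_exact" := by
  intro k h
  rw [beq_iff_eq] at h
  rcases rank_master k with ⟨hp, hb1, hb2⟩|⟨hp, hb1, hb2⟩|⟨hp, hb1, hb2⟩|⟨hp, hb1, hb2⟩|⟨hp, hb1, hb2⟩|⟨hp, hb1, hb2⟩|h30
  · omega
  · omega
  · omega
  · rw [pvRank_eq, hp, rs3] at h
    split_ifs at h <;> first | (exact eq_of_beq ‹_›) | (exact absurd h (by decide))
  · omega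
  · omega
  · omega

lemma pv_uniq_18 : ∀ k, (pvRank k == (18 : Int)) = true → k = "hilbertsfc_torch_eager" := by
  intro k h
  rw [beq_iff_eq] at h
  rcases rank_master k with ⟨hp, hb1, hb2⟩|⟨hp, hb1, hb2⟩|⟨hp, hb1, hb2⟩|⟨hp, hb1, hb2⟩|⟨hp, hb1, hb2⟩|⟨hp, hb1, hb2⟩|h30
  · omega
  · omega
  · omega
  · rw [pvRank_eq, hp, rs3] at h
    split_ifs at h <;> first | (exact eq_of_beq ‹_›) | (exact absurd h (by decide))
  · omega
  · omega
  · omega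

lemma pv_b4_3 : ∀ k, (pvProviderFromSeries k == "hilbertsfc_torch_eager" && !(decide (k ∈ (["hilbertsfc_torch_eager:heuristic", "hilbertsfc_torch_eager:autotune_bucketed", "hilbertsfc_torch_eager:autotune_exact", "hilbertsfc_torch_eager"] : List String)))) = (pvRank k == (19 : Int)) := by
  intro k
  by_cases hp : pvProviderFromSeries k = "hilbertsfc_torch_eager"
  · rw [pvRank_eq, hp, rs3]
    split_ifs with hx0 hx1 hx2 hx3
    · obtain rfl := eq_of_beq hx0; decide
    · obtain rfl := eq_of_beq hx1; decide
    · obtain rfl := eq_of_beq hx2; decide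
    · obtain rfl := eq_of_beq hx3; decide
    · simp only [beq_iff_eq] at hx0 hx1 hx2 hx3
      simp [List.mem_cons, hx0, hx1, hx2, hx3]
  · have hne : pvRank k ≠ (19 : Int) := by
      intro he
      rcases rank_master k with ⟨hp2, hb1, hb2⟩|⟨hp2, hb1, hb2⟩|⟨hp2, hb1, hb2⟩|⟨hp2, hb1, hb2⟩|⟨hp2, hb1, hb2⟩|⟨hp2, hb1, hb2⟩|h30
      · omega
      · omega
      · omega
      · exact absurd hp2 hp
      · omega
      · omega
      · omega
    rw [Bool.eq_iff_iff]
    simp [hp, hne]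

lemma pv_step_3 (K acc : List String) (hK : K.Nodup)
    (hacc : ∀ x ∈ acc, pvProviderFromSeries x ≠ "hilbertsfc_torch_eager") :
    pvProviderStep K acc "hilbertsfc_torch_eager" =
      acc ++ K.filter (fun k => pvRank k == (15 : Int)) ++ K.filter (fun k => pvRank k == (16 : Int))
          ++ K.filter (fun k => pvRank k == (17 : Int)) ++ K.filter (fun k => pvRank k == (18 : Int))
          ++ K.filter (fun k => pvRank k == (19 : Int)) := by
  rw [step_eq K acc hK "hilbertsfc_torch_eager" "hilbertsfc_torch_eager:heuristic" "hilbertsfc_torch_eager:autotune_bucketed" "hilbertsfc_torch_eager:autotune_exact" rfl rfl rfl (by decide) (by decide) (by decide) (by decide) hacc]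
  rw [filter_eq_single K hK _ "hilbertsfc_torch_eager:heuristic" (by decide) pv_uniq_15]
  rw [filter_eq_single K hK _ "hilbertsfc_torch_eager:autotune_bucketed" (by decide) pv_uniq_16]
  rw [filter_eq_single K hK _ "hilbertsfc_torch_eager:autotune_exact" (by decide) pv_uniq_17]
  rw [filter_eq_single K hK _ "hilbertsfc_torch_eager" (by decide) pv_uniq_18]
  rw [List.filter_congr (fun k _ => pv_b4_3 k)]

lemma rank_of_prov_4 (x : String) (h : pvProviderFromSeries x = "hilbertsfc_torch_compile") :
    (20 : Int) ≤ pvRank x ∧ pvRank x ≤ 24 := by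
  rw [pvRank_eq, h, rs4]; split_ifs <;> omega

lemma pv_uniq_20 : ∀ k, (pvRank k == (20 : Int)) = true → k = "hilbertsfc_torch_compile:heuristic" := by
  intro k h
  rw [beq_iff_eq] at h
  rcases rank_master k with ⟨hp, hb1, hb2⟩|⟨hp, hb1, hb2⟩|⟨hp, hb1, hb2⟩|⟨hp, hb1, hb2⟩|⟨hp, hb1, hb2⟩|⟨hp, hb1, hb2⟩|h30
  · omega
  · omega
  · omega
  · omega
  · rw [pvRank_eq, hp, rs4] at h
    split_ifs at h <;> first | (exact eq_of_beq ‹_›) | (exact absurd h (by decide))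
  · omega
  · omega

lemma pv_uniq_21 : ∀ k, (pvRank k == (21 : Int)) = true → k = "hilbertsfc_torch_compile:autotune_bucketed" := by
  intro k h
  rw [beq_iff_eq] at h
  rcases rank_master k with ⟨hp, hb1, hb2⟩|⟨hp, hb1, hb2⟩|⟨hp, hb1, hb2⟩|⟨hp, hb1, hb2⟩|⟨hp, hb1, hb2⟩|⟨hp, hb1, hb2⟩|h30
  · omega
  · omega
  · omega
  · omega
  · rw [pvRank_eq, hp, rs4] at h
    split_ifs at h <;> first | (exact eq_of_beq ‹_›) | (exact absurd h (by decide))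
  · omega
  · omega

lemma pv_uniq_22 : ∀ k, (pvRank k == (22 : Int)) = true → k = "hilbertsfc_torch_compile:autotune_exact" := by
  intro k h
  rw [beq_iff_eq] at h
  rcases rank_master k with ⟨hp, hb1, hb2⟩|⟨hp, hb1, hb2⟩|⟨hp, hb1, hb2⟩|⟨hp, hb1, hb2⟩|⟨hp, hb1, hb2⟩|⟨hp, hb1, hb2⟩|h30
  · omega
  · omega
  · omega
  · omega
  · rw [pvRank_eq, hp, rs4] at h
    split_ifs at h <;> first | (exact eq_of_beq ‹_›) | (exact absurd h (by decide))
  · omega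
  · omega

lemma pv_uniq_23 : ∀ k, (pvRank k == (23 : Int)) = true → k = "hilbertsfc_torch_compile" := by
  intro k h
  rw [beq_iff_eq] at h
  rcases rank_master k with ⟨hp, hb1, hb2⟩|⟨hp, hb1, hb2⟩|⟨hp, hb1, hb2⟩|⟨hp, hb1, hb2⟩|⟨hp, hb1, hb2⟩|⟨hp, hb1, hb2⟩|h30
  · omega
  · omega
  · omega
  · omega
  · rw [pvRank_eq, hp, rs4] at h
    split_ifs at h <;> first | (exact eq_of_beq ‹_›) | (exact absurd h (by decide))
  · omega
  · omega

lemma pv_b4_4 : ∀ k, (pvProviderFromSeries k == "hilbertsfc_torch_compile" && !(decide (k ∈ (["hilbertsfc_torch_compile:heuristic", "hilbertsfc_torch_compile:autotune_bucketed", "hilbertsfc_torch_compile:autotune_exact", "hilbertsfc_torch_compile"] : List String)))) = (pvRank k == (24 : Int)) := by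
  intro k
  by_cases hp : pvProviderFromSeries k = "hilbertsfc_torch_compile"
  · rw [pvRank_eq, hp, rs4]
    split_ifs with hx0 hx1 hx2 hx3
    · obtain rfl := eq_of_beq hx0; decide
    · obtain rfl := eq_of_beq hx1; decide
    · obtain rfl := eq_of_beq hx2; decide
    · obtain rfl := eq_of_beq hx3; decide
    · simp only [beq_iff_eq] at hx0 hx1 hx2 hx3
      simp [List.mem_cons, hx0, hx1, hx2, hx3]
  · have hne : pvRank k ≠ (24 : Int) := by
      intro he
      rcases rank_master k with ⟨hp2, hb1, hb2⟩|⟨hp2, hb1, hb2⟩|⟨hp2, hb1, hb2⟩|⟨hp2, hb1, hb2⟩|⟨hp2, hb1, hb2⟩|⟨hp2, hb1, hb2⟩|h30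
      · omega
      · omega
      · omega
      · omega
      · exact absurd hp2 hp
      · omega
      · omega
    rw [Bool.eq_iff_iff]
    simp [hp, hne]

lemma pv_step_4 (K acc : List String) (hK : K.Nodup)
    (hacc : ∀ x ∈ acc, pvProviderFromSeries x ≠ "hilbertsfc_torch_compile") :
    pvProviderStep K acc "hilbertsfc_torch_compile" =
      acc ++ K.filter (fun k => pvRank k == (20 : Int)) ++ K.filter (fun k => pvRank k == (21 : Int))
          ++ K.filter (fun k => pvRank k == (22 : Int)) ++ K.filter (fun k => pvRank k == (23 : Int))
          ++ K.filter (fun k => pvRank k == (24 : Int)) := by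
  rw [step_eq K acc hK "hilbertsfc_torch_compile" "hilbertsfc_torch_compile:heuristic" "hilbertsfc_torch_compile:autotune_bucketed" "hilbertsfc_torch_compile:autotune_exact" rfl rfl rfl (by decide) (by decide) (by decide) (by decide) hacc]
  rw [filter_eq_single K hK _ "hilbertsfc_torch_compile:heuristic" (by decide) pv_uniq_20]
  rw [filter_eq_single K hK _ "hilbertsfc_torch_compile:autotune_bucketed" (by decide) pv_uniq_21]
  rw [filter_eq_single K hK _ "hilbertsfc_torch_compile:autotune_exact" (by decide) pv_uniq_22]
  rw [filter_eq_single K hK _ "hilbertsfc_torch_compile" (by decide) pv_uniq_23]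
  rw [List.filter_congr (fun k _ => pv_b4_4 k)]

lemma rank_of_prov_5 (x : String) (h : pvProviderFromSeries x = "hilbertsfc_triton") :
    (25 : Int) ≤ pvRank x ∧ pvRank x ≤ 29 := by
  rw [pvRank_eq, h, rs5]; split_ifs <;> omega

lemma pv_uniq_25 : ∀ k, (pvRank k == (25 : Int)) = true → k = "hilbertsfc_triton:heuristic" := by
  intro k h
  rw [beq_iff_eq] at h
  rcases rank_master k with ⟨hp, hb1, hb2⟩|⟨hp, hb1, hb2⟩|⟨hp, hb1, hb2⟩|⟨hp, hb1, hb2⟩|⟨hp, hb1, hb2⟩|⟨hp, hb1, hb2⟩|h30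
  · omega
  · omega
  · omega
  · omega
  · omega
  · rw [pvRank_eq, hp, rs5] at h
    split_ifs at h <;> first | (exact eq_of_beq ‹_›) | (exact absurd h (by decide))
  · omega

lemma pv_uniq_26 : ∀ k, (pvRank k == (26 : Int)) = true → k = "hilbertsfc_triton:autotune_bucketed" := by
  intro k h
  rw [beq_iff_eq] at h
  rcases rank_master k with ⟨hp, hb1, hb2⟩|⟨hp, hb1, hb2⟩|⟨hp, hb1, hb2⟩|⟨hp, hb1, hb2⟩|⟨hp, hb1, hb2⟩|⟨hp, hb1, hb2⟩|h30
  · omega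
  · omega
  · omega
  · omega
  · omega
  · rw [pvRank_eq, hp, rs5] at h
    split_ifs at h <;> first | (exact eq_of_beq ‹_›) | (exact absurd h (by decide))
  · omega

lemma pv_uniq_27 : ∀ k, (pvRank k == (27 : Int)) = true → k = "hilbertsfc_triton:autotune_exact" := by
  intro k h
  rw [beq_iff_eq] at h
  rcases rank_master k with ⟨hp, hb1, hb2⟩|⟨hp, hb1, hb2⟩|⟨hp, hb1, hb2⟩|⟨hp, hb1, hb2⟩|⟨hp, hb1, hb2⟩|⟨hp, hb1, hb2⟩|h30
  · omega
  · omega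
  · omega
  · omega
  · omega
  · rw [pvRank_eq, hp, rs5] at h
    split_ifs at h <;> first | (exact eq_of_beq ‹_›) | (exact absurd h (by decide))
  · omega

lemma pv_uniq_28 : ∀ k, (pvRank k == (28 : Int)) = true → k = "hilbertsfc_triton" := by
  intro k h
  rw [beq_iff_eq] at h
  rcases rank_master k with ⟨hp, hb1, hb2⟩|⟨hp, hb1, hb2⟩|⟨hp, hb1, hb2⟩|⟨hp, hb1, hb2⟩|⟨hp, hb1, hb2⟩|⟨hp, hb1, hb2⟩|h30
  · omega
  · omega
  · omega
  · omega
  · omega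
  · rw [pvRank_eq, hp, rs5] at h
    split_ifs at h <;> first | (exact eq_of_beq ‹_›) | (exact absurd h (by decide))
  · omega

lemma pv_b4_5 : ∀ k, (pvProviderFromSeries k == "hilbertsfc_triton" && !(decide (k ∈ (["hilbertsfc_triton:heuristic", "hilbertsfc_triton:autotune_bucketed", "hilbertsfc_triton:autotune_exact", "hilbertsfc_triton"] : List String)))) = (pvRank k == (29 : Int)) := by
  intro k
  by_cases hp : pvProviderFromSeries k = "hilbertsfc_triton"
  · rw [pvRank_eq, hp, rs5]
    split_ifs with hx0 hx1 hx2 hx3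
    · obtain rfl := eq_of_beq hx0; decide
    · obtain rfl := eq_of_beq hx1; decide
    · obtain rfl := eq_of_beq hx2; decide
    · obtain rfl := eq_of_beq hx3; decide
    · simp only [beq_iff_eq] at hx0 hx1 hx2 hx3
      simp [List.mem_cons, hx0, hx1, hx2, hx3]
  · have hne : pvRank k ≠ (29 : Int) := by
      intro he
      rcases rank_master k with ⟨hp2, hb1, hb2⟩|⟨hp2, hb1, hb2⟩|⟨hp2, hb1, hb2⟩|⟨hp2, hb1, hb2⟩|⟨hp2, hb1, hb2⟩|⟨hp2, hb1, hb2⟩|h30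
      · omega
      · omega
      · omega
      · omega
      · omega
      · exact absurd hp2 hp
      · omega
    rw [Bool.eq_iff_iff]
    simp [hp, hne]

lemma pv_step_5 (K acc : List String) (hK : K.Nodup)
    (hacc : ∀ x ∈ acc, pvProviderFromSeries x ≠ "hilbertsfc_triton") :
    pvProviderStep K acc "hilbertsfc_triton" =
      acc ++ K.filter (fun k => pvRank k == (25 : Int)) ++ K.filter (fun k => pvRank k == (26 : Int))
          ++ K.filter (fun k => pvRank k == (27 : Int)) ++ K.filter (fun k => pvRank k == (28 : Int))
          ++ K.filter (fun k => pvRank k == (29 : Int)) := by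
  rw [step_eq K acc hK "hilbertsfc_triton" "hilbertsfc_triton:heuristic" "hilbertsfc_triton:autotune_bucketed" "hilbertsfc_triton:autotune_exact" rfl rfl rfl (by decide) (by decide) (by decide) (by decide) hacc]
  rw [filter_eq_single K hK _ "hilbertsfc_triton:heuristic" (by decide) pv_uniq_25]
  rw [filter_eq_single K hK _ "hilbertsfc_triton:autotune_bucketed" (by decide) pv_uniq_26]
  rw [filter_eq_single K hK _ "hilbertsfc_triton:autotune_exact" (by decide) pv_uniq_27]
  rw [filter_eq_single K hK _ "hilbertsfc_triton" (by decide) pv_uniq_28]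
  rw [List.filter_congr (fun k _ => pv_b4_5 k)]

lemma rank_bounds (k : String) : (0 : Int) ≤ pvRank k ∧ pvRank k ≤ 30 := by
  rcases rank_master k with ⟨-, hb1, hb2⟩|⟨-, hb1, hb2⟩|⟨-, hb1, hb2⟩|⟨-, hb1, hb2⟩|⟨-, hb1, hb2⟩|⟨-, hb1, hb2⟩|h30 <;> omega

lemma pv_hacc_1 (K : List String) : ∀ x ∈ ([] : List String) ++ K.filter (fun k => pvRank k == (0 : Int)) ++ K.filter (fun k => pvRank k == (1 : Int)) ++ K.filter (fun k => pvRank k == (2 : Int)) ++ K.filter (fun k => pvRank k == (3 : Int)) ++ K.filter (fun k => pvRank k == (4 : Int)), pvProviderFromSeries x ≠ "skilling_triton_2d" := by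
  intro x hx hEq
  have hb := rank_of_prov_1 x hEq
  simp only [List.mem_append, List.mem_filter, List.not_mem_nil, false_or, beq_iff_eq] at hx
  rcases hx with ((((⟨-, h⟩|⟨-, h⟩)|⟨-, h⟩)|⟨-, h⟩)|⟨-, h⟩) <;> omega

lemma pv_hacc_2 (K : List String) : ∀ x ∈ ([] : List String) ++ K.filter (fun k => pvRank k == (0 : Int)) ++ K.filter (fun k => pvRank k == (1 : Int)) ++ K.filter (fun k => pvRank k == (2 : Int)) ++ K.filter (fun k => pvRank k == (3 : Int)) ++ K.filter (fun k => pvRank k == (4 : Int)) ++ K.filter (fun k => pvRank k == (5 : Int)) ++ K.filter (fun k => pvRank k == (6 : Int)) ++ K.filter (fun k => pvRank k == (7 : Int)) ++ K.filter (fun k => pvRank k == (8 : Int)) ++ K.filter (fun k => pvRank k == (9 : Int)), pvProviderFromSeries x ≠ "skilling_triton_3d" := by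
  intro x hx hEq
  have hb := rank_of_prov_2 x hEq
  simp only [List.mem_append, List.mem_filter, List.not_mem_nil, false_or, beq_iff_eq] at hx
  rcases hx with (((((((((⟨-, h⟩|⟨-, h⟩)|⟨-, h⟩)|⟨-, h⟩)|⟨-, h⟩)|⟨-, h⟩)|⟨-, h⟩)|⟨-, h⟩)|⟨-, h⟩)|⟨-, h⟩) <;> omega

lemma pv_hacc_3 (K : List String) : ∀ x ∈ ([] : List String) ++ K.filter (fun k => pvRank k == (0 : Int)) ++ K.filter (fun k => pvRank k == (1 : Int)) ++ K.filter (fun k => pvRank k == (2 : Int)) ++ K.filter (fun k => pvRank k == (3 : Int)) ++ K.filter (fun k => pvRank k == (4 : Int)) ++ K.filter (fun k => pvRank k == (5 : Int)) ++ K.filter (fun k => pvRank k == (6 : Int)) ++ K.filter (fun k => pvRank k == (7 : Int)) ++ K.filter (fun k => pvRank k == (8 : Int)) ++ K.filter (fun k => pvRank k == (9 : Int)) ++ K.filter (fun k => pvRank k == (10 : Int)) ++ K.filter (fun k => pvRank k == (11 : Int)) ++ K.filter (fun k => pvRank k == (12 : Int)) ++ K.filter (fun k => pvRank k == (13 : Int))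 ++ K.filter (fun k => pvRank k == (14 : Int)), pvProviderFromSeries x ≠ "hilbertsfc_torch_eager" := by
  intro x hx hEq
  have hb := rank_of_prov_3 x hEq
  simp only [List.mem_append, List.mem_filter, List.not_mem_nil, false_or, beq_iff_eq] at hx
  rcases hx with ((((((((((((((⟨-, h⟩|⟨-, h⟩)|⟨-, h⟩)|⟨-, h⟩)|⟨-, h⟩)|⟨-, h⟩)|⟨-, h⟩)|⟨-, h⟩)|⟨-, h⟩)|⟨-, h⟩)|⟨-, h⟩)|⟨-, h⟩)|⟨-, h⟩)|⟨-, h⟩)|⟨-, h⟩) <;> omega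

lemma pv_hacc_4 (K : List String) : ∀ x ∈ ([] : List String) ++ K.filter (fun k => pvRank k == (0 : Int)) ++ K.filter (fun k => pvRank k == (1 : Int)) ++ K.filter (fun k => pvRank k == (2 : Int)) ++ K.filter (fun k => pvRank k == (3 : Int)) ++ K.filter (fun k => pvRank k == (4 : Int)) ++ K.filter (fun k => pvRank k == (5 : Int)) ++ K.filter (fun k => pvRank k == (6 : Int)) ++ K.filter (fun k => pvRank k == (7 : Int)) ++ K.filter (fun k => pvRank k == (8 : Int)) ++ K.filter (fun k => pvRank k == (9 : Int)) ++ K.filter (fun k => pvRank k == (10 : Int)) ++ K.filter (fun k => pvRank k == (11 : Int)) ++ K.filter (fun k => pvRank k == (12 : Int)) ++ K.filter (fun k => pvRank k == (13 : Int)) ++ K.filter (fun k => pvRank k == (14 : Int)) ++ K.filter (fun k => pvRank k == (15 : Int)) ++ K.filter (fun k => pvRank k == (16 : Int)) ++ K.filter (fun k => pvRank k == (17 : Int)) ++ K.filter (fun k => pvRank k == (18 : Int)) ++ K.filter (fun k => pvRank k == (19 : Int)), pvProviderFromSeries x ≠ "hilbertsfc_torch_compile" := by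
  intro x hx hEq
  have hb := rank_of_prov_4 x hEq
  simp only [List.mem_append, List.mem_filter, List.not_mem_nil, false_or, beq_iff_eq] at hx
  rcases hx with (((((((((((((((((((⟨-, h⟩|⟨-, h⟩)|⟨-, h⟩)|⟨-, h⟩)|⟨-, h⟩)|⟨-, h⟩)|⟨-, h⟩)|⟨-, h⟩)|⟨-, h⟩)|⟨-, h⟩)|⟨-, h⟩)|⟨-, h⟩)|⟨-, h⟩)|⟨-, h⟩)|⟨-, h⟩)|⟨-, h⟩)|⟨-, h⟩)|⟨-, h⟩)|⟨-, h⟩)|⟨-, h⟩) <;> omega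

lemma pv_hacc_5 (K : List String) : ∀ x ∈ ([] : List String) ++ K.filter (fun k => pvRank k == (0 : Int)) ++ K.filter (fun k => pvRank k == (1 : Int)) ++ K.filter (fun k => pvRank k == (2 : Int)) ++ K.filter (fun k => pvRank k == (3 : Int)) ++ K.filter (fun k => pvRank k == (4 : Int)) ++ K.filter (fun k => pvRank k == (5 : Int)) ++ K.filter (fun k => pvRank k == (6 : Int)) ++ K.filter (fun k => pvRank k == (7 : Int)) ++ K.filter (fun k => pvRank k == (8 : Int)) ++ K.filter (fun k => pvRank k == (9 : Int)) ++ K.filter (fun k => pvRank k == (10 : Int)) ++ K.filter (fun k => pvRank k == (11 : Int)) ++ K.filter (fun k => pvRank k == (12 : Int)) ++ K.filter (fun k => pvRank k == (13 : Int)) ++ K.filter (fun k => pvRank k == (14 : Int)) ++ K.filter (fun k => pvRank k == (15 : Int)) ++ K.filter (fun k => pvRank k == (16 : Int)) ++ K.filter (fun k => pvRank k == (17 : Int)) ++ K.filter (fun k => pvRank k == (18 : Int)) ++ K.filter (fun k => pvRank k == (19 : Int)) ++ K.filter (fun k => pvRank k == (20 : Int)) ++ K.filter (fun k => pvRank k ==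 (21 : Int)) ++ K.filter (fun k => pvRank k == (22 : Int)) ++ K.filter (fun k => pvRank k == (23 : Int)) ++ K.filter (fun k => pvRank k == (24 : Int)), pvProviderFromSeries x ≠ "hilbertsfc_triton" := by
  intro x hx hEq
  have hb := rank_of_prov_5 x hEq
  simp only [List.mem_append, List.mem_filter, List.not_mem_nil, false_or, beq_iff_eq] at hx
  rcases hx with ((((((((((((((((((((((((⟨-, h⟩|⟨-, h⟩)|⟨-, h⟩)|⟨-, h⟩)|⟨-, h⟩)|⟨-, h⟩)|⟨-, h⟩)|⟨-, h⟩)|⟨-, h⟩)|⟨-, h⟩)|⟨-, h⟩)|⟨-, h⟩)|⟨-, h⟩)|⟨-, h⟩)|⟨-, h⟩)|⟨-, h⟩)|⟨-, h⟩)|⟨-, h⟩)|⟨-, h⟩)|⟨-, h⟩)|⟨-, h⟩)|⟨-, h⟩)|⟨-, h⟩)|⟨-, h⟩)|⟨-, h⟩) <;> omega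

theorem pv_main : ∀ K : List String, K.Nodup →
    pvPreferred.foldl (pvProviderStep K) [] ++ K.filter (fun k => !(decide (k ∈ pvPreferred.foldl (pvProviderStep K) []))) =
    (PySem.List.pyRange 0 31 1).flatMap (fun r => K.filter (fun k => pvRank k == r)) := by
  intro K hK
  have e : pvPreferred.foldl (pvProviderStep K) [] = ([] : List String) ++ K.filter (fun k => pvRank k == (0 : Int)) ++ K.filter (fun k => pvRank k == (1 : Int)) ++ K.filter (fun k => pvRank k == (2 : Int)) ++ K.filter (fun k => pvRank k == (3 : Int)) ++ K.filter (fun k => pvRank k == (4 : Int)) ++ K.filter (fun k => pvRank k == (5 : Int)) ++ K.filter (fun k => pvRank k == (6 : Int)) ++ K.filter (fun k => pvRank k == (7 : Int)) ++ K.filter (fun k => pvRank k == (8 : Int)) ++ K.filter (fun k => pvRank k == (9 : Int)) ++ K.filter (fun k => pvRank k == (10 : Int)) ++ K.filter (fun k => pvRank k == (11 : Int)) ++ K.filter (fun k => pvRank k == (12 : Int)) ++ K.filter (fun k => pvRank k == (13 : Int)) ++ K.filter (fun k => pvRank k == (14 : Int)) ++ K.filter (fun k => pvRank k == (15 : Int))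 ++ K.filter (fun k => pvRank k == (16 : Int)) ++ K.filter (fun k => pvRank k == (17 : Int)) ++ K.filter (fun k => pvRank k == (18 : Int)) ++ K.filter (fun k => pvRank k == (19 : Int)) ++ K.filter (fun k => pvRank k == (20 : Int)) ++ K.filter (fun k => pvRank k == (21 : Int)) ++ K.filter (fun k => pvRank k == (22 : Int)) ++ K.filter (fun k => pvRank k == (23 : Int)) ++ K.filter (fun k => pvRank k == (24 : Int)) ++ K.filter (fun k => pvRank k == (25 : Int)) ++ K.filter (fun k => pvRank k == (26 : Int)) ++ K.filter (fun k => pvRank k == (27 : Int)) ++ K.filter (fun k => pvRank k == (28 : Int)) ++ K.filter (fun k => pvRank k == (29 : Int)) := by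
    unfold pvPreferred
    simp only [List.foldl]
    rw [pv_step_0 K [] hK (by simp), pv_step_1 K _ hK (pv_hacc_1 K), pv_step_2 K _ hK (pv_hacc_2 K),
        pv_step_3 K _ hK (pv_hacc_3 K), pv_step_4 K _ hK (pv_hacc_4 K), pv_step_5 K _ hK (pv_hacc_5 K)]
  rw [e]
  have ex : K.filter (fun k => !(decide (k ∈ ([] : List String) ++ K.filter (fun k => pvRank k == (0 : Int)) ++ K.filter (fun k => pvRank k == (1 : Int)) ++ K.filter (fun k => pvRank k == (2 : Int)) ++ K.filter (fun k => pvRank k == (3 : Int)) ++ K.filter (fun k => pvRank k == (4 : Int)) ++ K.filter (fun k => pvRank k == (5 : Int)) ++ K.filter (fun k => pvRank k == (6 : Int)) ++ K.filter (fun k => pvRank k == (7 : Int)) ++ K.filter (fun k => pvRank k == (8 : Int)) ++ K.filter (fun k => pvRank k == (9 : Int)) ++ K.filter (fun k => pvRank k == (10 : Int)) ++ K.filter (fun k => pvRank k == (11 : Int)) ++ K.filter (fun k => pvRank k == (12 : Int)) ++ K.filter (fun k => pvRank k == (13 : Int)) ++ K.filter (fun k => pvRank k == (14 : Int)) ++ K.filter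 (fun k => pvRank k == (15 : Int)) ++ K.filter (fun k => pvRank k == (16 : Int)) ++ K.filter (fun k => pvRank k == (17 : Int)) ++ K.filter (fun k => pvRank k == (18 : Int)) ++ K.filter (fun k => pvRank k == (19 : Int)) ++ K.filter (fun k => pvRank k == (20 : Int)) ++ K.filter (fun k => pvRank k == (21 : Int)) ++ K.filter (fun k => pvRank k == (22 : Int)) ++ K.filter (fun k => pvRank k == (23 : Int)) ++ K.filter (fun k => pvRank k == (24 : Int)) ++ K.filter (fun k => pvRank k == (25 : Int)) ++ K.filter (fun k => pvRank k == (26 : Int)) ++ K.filter (fun k => pvRank k == (27 : Int)) ++ K.filter (fun k => pvRank k == (28 : Int)) ++ K.filter (fun k => pvRank k == (29 : Int))))) =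
      K.filter (fun k => pvRank k == (30 : Int)) := by
    apply List.filter_congr
    intro k hk
    rw [Bool.eq_iff_iff]
    have hb := rank_bounds k
    by_cases h30 : pvRank k = 30
    · simp [List.mem_append, List.mem_filter, h30]
    · simp only [List.mem_append, List.mem_filter, List.not_mem_nil, false_or, beq_iff_eq,
        Bool.not_eq_true', decide_eq_false_iff_not, hk, true_and]
      constructor
      · intro hno
        exact absurd (by push Not at hno; omega : pvRank k = 30) h30
      · intro h
        exact absurd h h30
  rw [ex]
  rw [(by decide : PySem.List.pyRange 0 31 1 = ([0, 1, 2, 3, 4, 5, 6, 7, 8, 9, 10, 11, 12, 13, 14, 15, 16, 17, 18, 19, 20, 21, 22, 23, 24, 25, 26, 27, 28, 29, 30] : List Int))]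
  simp only [List.flatMap_cons, List.flatMap_nil, List.append_nil, List.nil_append, List.append_assoc]

-- ===== VERDICT (by name: the statement is the Claim_ definition above) =====
theorem ordered_providers_py_spec : Claim_equal_ordered_providers_py := by
  intro subset _
  unfold Spec_ordered_providers_py
  simp only [ordered_providers_py, ordered_providers_py_alt]
  rw [keysA]
  exact pv_main _ (PySem.List.nodup_dedup _)
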